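-- pv_equiv track=rewrite | github.com/juliettemarzo/SisterSync | src/algorithm.py | best_mutual_choice
-- ===== SOURCE A (Python) =====
-- def best_mutual_choice(person, their_prefs, other_ranks, matched_set):
--     """
--     Find this person's highest-ranked option who also ranked them back.
--     If none found, return their highest-ranked available option.
--     """
--     for other in their_prefs.get(person, []):
--         if other not in matched_set:
--             if person in other_ranks.get(other, {}):
--                 return other
--     for other in their_prefs.get(person, []):
--         if other not in matched_set:
--             return other
--     return None
-- ===== SOURCE B (Python) =====
-- def best_mutual_choice(person, their_prefs, other_ranks, matched_set):
--     """Single pass: return the first unmatched mutual preference; keep the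
--     first unmatched candidate as a fallback and return it if no mutual exists."""
--     fallback = None
--     for other in their_prefs.get(person, []):
--         if other in matched_set:
--             continue
--         if fallback is None:
--             fallback = other
--         if person in other_ranks.get(other, {}):
--             return other
--     return fallback
-- ===== Notes on version B (the rewrite author's own statement) =====
-- stated objective: alternative
-- what changed: A scans the preference list twice (once for a mutual choice, then again from the start for any available choice); B makes a single pass carrying a first-available fallback accumulator and returning early on the first mutual.
import Mathlib
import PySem

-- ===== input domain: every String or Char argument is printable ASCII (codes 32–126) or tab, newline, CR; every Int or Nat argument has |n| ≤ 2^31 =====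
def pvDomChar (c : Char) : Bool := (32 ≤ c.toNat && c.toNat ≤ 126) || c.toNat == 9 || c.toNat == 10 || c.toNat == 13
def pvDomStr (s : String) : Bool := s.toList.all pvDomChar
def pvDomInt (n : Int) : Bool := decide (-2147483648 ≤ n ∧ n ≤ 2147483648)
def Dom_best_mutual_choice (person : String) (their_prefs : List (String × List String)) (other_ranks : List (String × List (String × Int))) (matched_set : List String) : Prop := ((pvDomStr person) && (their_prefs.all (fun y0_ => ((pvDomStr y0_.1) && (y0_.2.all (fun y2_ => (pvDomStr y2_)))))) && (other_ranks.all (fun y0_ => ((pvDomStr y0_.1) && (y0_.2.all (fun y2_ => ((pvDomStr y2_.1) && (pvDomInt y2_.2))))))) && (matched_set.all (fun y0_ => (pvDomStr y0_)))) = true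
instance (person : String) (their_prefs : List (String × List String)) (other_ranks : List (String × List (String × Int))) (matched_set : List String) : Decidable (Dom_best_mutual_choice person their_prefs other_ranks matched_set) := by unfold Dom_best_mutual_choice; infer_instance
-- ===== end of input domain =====

-- ===== PORT A =====
-- B merges A's two scans into one fallback-carrying pass; same return value everywhere.
-- their_prefs.get(person, []) / other_ranks.get(other, {}): first-match dict lookup
def bmcGetPrefs (their_prefs : List (String × List String)) (person : String) : List String :=
  (PySem.Dict.mk their_prefs).getD person []

-- person in other_ranks.get(other, {}): key membership of the looked-up dict
def bmcMutual (person : String) (other_ranks : List (String × List (String × Int))) (other : String) : Bool :=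
  (PySem.Dict.mk ((PySem.Dict.mk other_ranks).getD other [])).contains person

-- first loop of A: first unmatched `other` who ranked `person` back
def bmcLoop1 (person : String) (other_ranks : List (String × List (String × Int))) (matched_set : List String) : List String → Option String
  | [] => none
  | o :: rest =>
      if !(matched_set.contains o) && bmcMutual person other_ranks o then some o
      else bmcLoop1 person other_ranks matched_set rest

-- second loop of A: first unmatched `other`
def bmcLoop2 (matched_set : List String) : List String → Option String
  | [] => none
  | o :: rest => if !(matched_set.contains o) then some o else bmcLoop2 matched_set rest

def best_mutual_choice (person : String) (their_prefs : List (String × List String)) (other_ranks : List (String × List (String × Int))) (matched_set : List String) : Option String :=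
  match bmcLoop1 person other_ranks matched_set (bmcGetPrefs their_prefs person) with
  | some o => some o
  | none => bmcLoop2 matched_set (bmcGetPrefs their_prefs person)

-- ===== PORT B =====
-- single pass with a first-available fallback accumulator (Source B's loop)
def bmcLoopB (person : String) (other_ranks : List (String × List (String × Int))) (matched_set : List String) (fallback : Option String) : List String → Option String
  | [] => fallback
  | o :: rest =>
      if matched_set.contains o then bmcLoopB person other_ranks matched_set fallback rest
      else
        let fb := if fallback.isNone then some o else fallback
        if bmcMutual person other_ranks o then some o
        else bmcLoopB person other_ranks matched_set fb rest

def best_mutual_choice_alt (person : String) (their_prefs : List (String × List String)) (other_ranks : List (String × List (String × Int))) (matched_set : List String) : Option String :=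
  bmcLoopB person other_ranks matched_set none (bmcGetPrefs their_prefs person)

-- ===== PRECONDITION & SPEC =====
def Spec_best_mutual_choice (person : String) (their_prefs : List (String × List String)) (other_ranks : List (String × List (String × Int))) (matched_set : List String) (out : Option String) : Prop := out = best_mutual_choice_alt person their_prefs other_ranks matched_set
instance (person : String) (their_prefs : List (String × List String)) (other_ranks : List (String × List (String × Int))) (matched_set : List String) (out : Option String) : Decidable (Spec_best_mutual_choice person their_prefs other_ranks matched_set out) := by unfold Spec_best_mutual_choice; infer_instance

-- ===== CLAIM (what is proved, stated in full; the proofs are below) =====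
def Claim_equal_best_mutual_choice : Prop := ∀ (person : String) (their_prefs : List (String × List String)) (other_ranks : List (String × List (String × Int))) (matched_set : List String), Dom_best_mutual_choice person their_prefs other_ranks matched_set → Spec_best_mutual_choice person their_prefs other_ranks matched_set (best_mutual_choice person their_prefs other_ranks matched_set)

-- ===== LEMMAS AND PROOFS =====
-- invariant of B's loop: it is A's first scan, falling back to the accumulator, then A's second scan
theorem bmcLoopB_eq (person : String) (other_ranks : List (String × List (String × Int))) (matched_set : List String) (l : List String) (fb : Option String) :
    bmcLoopB person other_ranks matched_set fb l =
      match bmcLoop1 person other_ranks matched_set l with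
      | some o => some o
      | none => match fb with
        | some f => some f
        | none => bmcLoop2 matched_set l := by
  induction l generalizing fb with
  | nil => cases fb <;> rfl
  | cons o rest ih =>
      by_cases hm : o ∈ matched_set
      · simp [bmcLoopB, bmcLoop1, bmcLoop2, hm, ih]
      · by_cases hmu : bmcMutual person other_ranks o
        · simp [bmcLoopB, bmcLoop1, hm, hmu]
        · cases fb <;> simp [bmcLoopB, bmcLoop1, bmcLoop2, hm, hmu, ih]

-- ===== VERDICT (by name: the statement is the Claim_ definition above) =====
theorem best_mutual_choice_spec : Claim_equal_best_mutual_choice := by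
  intro person their_prefs other_ranks matched_set _
  unfold Spec_best_mutual_choice best_mutual_choice best_mutual_choice_alt
  rw [bmcLoopB_eq]
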